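-- pv_equiv track=rewrite | github.com/projectxqyz-ux/DiariCore | hf_nlp.py | _normalize_emotion
-- ===== SOURCE A (Python) =====
-- def _normalize_emotion(label: str) -> str:
--     raw = (label or "").strip().lower()
--     # Keep UI-compatible categories
--     if not raw:
--         return "neutral"
--     if any(k in raw for k in ("joy", "happiness", "love", "optimism", "trust")):
--         return "happy"
--     if any(k in raw for k in ("sad", "grief", "sorrow")):
--         return "sad"
--     if any(k in raw for k in ("anger", "angry", "rage", "annoy")):
--         return "angry"
--     if any(k in raw for k in ("fear", "anx", "stress", "worry", "nervous")):
--         return "stressed"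
--     if any(k in raw for k in ("surprise", "excit", "anticipation")):
--         return "excited"
--     if any(k in raw for k in ("calm", "peace", "relax")):
--         return "calm"
--     if "neutral" in raw:
--         return "neutral"
--     return "neutral"
-- ===== SOURCE B (Python) =====
-- # Reverse-priority scan: later (higher-priority) matches overwrite earlier ones,
-- # so the final value is the highest-priority matching category.
-- RULES_DESC = [
--     ("calm", "calm"), ("peace", "calm"), ("relax", "calm"),
--     ("surprise", "excited"), ("excit", "excited"), ("anticipation", "excited"),
--     ("fear", "stressed"), ("anx", "stressed"), ("stress", "stressed"),
--     ("worry", "stressed"), ("nervous", "stressed"),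
--     ("anger", "angry"), ("angry", "angry"), ("rage", "angry"), ("annoy", "angry"),
--     ("sad", "sad"), ("grief", "sad"), ("sorrow", "sad"),
--     ("joy", "happy"), ("happiness", "happy"), ("love", "happy"),
--     ("optimism", "happy"), ("trust", "happy"),
-- ]
--
--
-- def _normalize_emotion(label: str) -> str:
--     raw = (label or "").strip().lower()
--     result = "neutral"
--     for keyword, category in RULES_DESC:
--         if keyword in raw:
--             result = category
--     return result
-- ===== Notes on version B (the rewrite author's own statement) =====
-- stated objective: alternative
-- what changed: Replaces A's early-return priority chain of any()-checks with a single overwrite-accumulator pass over a keyword table in reverse priority order, so the last match (highest priority) wins and both the empty-string and default cases fall out of the initial 'neutral' accumulator.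
import Mathlib
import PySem

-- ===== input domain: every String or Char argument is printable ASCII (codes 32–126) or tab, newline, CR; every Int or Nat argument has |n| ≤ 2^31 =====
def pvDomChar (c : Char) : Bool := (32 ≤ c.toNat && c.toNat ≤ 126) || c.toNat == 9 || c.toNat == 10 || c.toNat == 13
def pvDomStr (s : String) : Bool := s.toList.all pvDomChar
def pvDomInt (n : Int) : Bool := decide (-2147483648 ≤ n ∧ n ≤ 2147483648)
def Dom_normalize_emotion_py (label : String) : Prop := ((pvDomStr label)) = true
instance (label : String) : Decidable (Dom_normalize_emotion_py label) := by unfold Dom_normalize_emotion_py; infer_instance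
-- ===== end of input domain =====

-- B replaces A's early-return priority chain by one overwrite-accumulator pass over a
-- keyword table in reverse priority order (last match wins); objective: alternative, same cost.

-- ===== PORT A =====
def normalize_emotion_py (label : String) : String :=
  let raw := PySem.Str.lower (PySem.Str.strip (if label == "" then "" else label))
  if raw == "" then "neutral"
  else if PySem.Str.isIn "joy" raw || PySem.Str.isIn "happiness" raw || PySem.Str.isIn "love" raw || PySem.Str.isIn "optimism" raw || PySem.Str.isIn "trust" raw then "happy"
  else if PySem.Str.isIn "sad" raw || PySem.Str.isIn "grief" raw || PySem.Str.isIn "sorrow" raw then "sad"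
  else if PySem.Str.isIn "anger" raw || PySem.Str.isIn "angry" raw || PySem.Str.isIn "rage" raw || PySem.Str.isIn "annoy" raw then "angry"
  else if PySem.Str.isIn "fear" raw || PySem.Str.isIn "anx" raw || PySem.Str.isIn "stress" raw || PySem.Str.isIn "worry" raw || PySem.Str.isIn "nervous" raw then "stressed"
  else if PySem.Str.isIn "surprise" raw || PySem.Str.isIn "excit" raw || PySem.Str.isIn "anticipation" raw then "excited"
  else if PySem.Str.isIn "calm" raw || PySem.Str.isIn "peace" raw || PySem.Str.isIn "relax" raw then "calm"
  else if PySem.Str.isIn "neutral" raw then "neutral"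
  else "neutral"

-- ===== PORT B =====
def pvRulesDesc : List (String × String) :=
  [ ("calm", "calm"), ("peace", "calm"), ("relax", "calm")
  , ("surprise", "excited"), ("excit", "excited"), ("anticipation", "excited")
  , ("fear", "stressed"), ("anx", "stressed"), ("stress", "stressed")
  , ("worry", "stressed"), ("nervous", "stressed")
  , ("anger", "angry"), ("angry", "angry"), ("rage", "angry"), ("annoy", "angry")
  , ("sad", "sad"), ("grief", "sad"), ("sorrow", "sad")
  , ("joy", "happy"), ("happiness", "happy"), ("love", "happy")
  , ("optimism", "happy"), ("trust", "happy") ]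

def normalize_emotion_py_alt (label : String) : String :=
  let raw := PySem.Str.lower (PySem.Str.strip (if label == "" then "" else label))
  pvRulesDesc.foldl
    (fun result p => if PySem.Str.isIn p.1 raw then p.2 else result) "neutral"

-- ===== PRECONDITION & SPEC =====
def Spec_normalize_emotion_py (label : String) (out : String) : Prop := out = normalize_emotion_py_alt label
instance (label : String) (out : String) : Decidable (Spec_normalize_emotion_py label out) := by unfold Spec_normalize_emotion_py; infer_instance

-- ===== CLAIM (what is proved, stated in full; the proofs are below) =====
def Claim_equal_normalize_emotion_py : Prop := ∀ (label : String), Dom_normalize_emotion_py label → Spec_normalize_emotion_py label (normalize_emotion_py label)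

-- ===== LEMMAS AND PROOFS =====

-- Folding the overwrite step over a run of keywords sharing one category c
-- yields c iff some keyword of the run matches, else the incoming state.
theorem pvFoldGroup (raw c s : String) (ks : List String) :
    List.foldl (fun result p => if PySem.Str.isIn p.1 raw then p.2 else result) s
      (ks.map (fun k => (k, c)))
    = if ks.any (fun k => PySem.Str.isIn k raw) then c else s := by
  induction ks generalizing s with
  | nil => simp
  | cons k rest ih =>
      simp only [List.map_cons, List.foldl_cons, List.any_cons, ih]
      rcases Bool.eq_false_or_eq_true (PySem.Str.isIn k raw) with h | h <;>
        rcases Bool.eq_false_or_eq_true (rest.any fun k => PySem.Str.isIn k raw)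
          with hr | hr <;>
        simp only [h, hr] <;> simp

-- The rule table is the concatenation of its per-category runs.
theorem pvRulesDesc_groups :
    pvRulesDesc =
      (["calm", "peace", "relax"].map (fun k => (k, "calm")))
      ++ (["surprise", "excit", "anticipation"].map (fun k => (k, "excited")))
      ++ (["fear", "anx", "stress", "worry", "nervous"].map (fun k => (k, "stressed")))
      ++ (["anger", "angry", "rage", "annoy"].map (fun k => (k, "angry")))
      ++ (["sad", "grief", "sorrow"].map (fun k => (k, "sad")))
      ++ (["joy", "happiness", "love", "optimism", "trust"].map (fun k => (k, "happy"))) := rfl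

-- Core: for every raw string the two computations over raw agree.
theorem pvMain (raw : String) :
    (if raw == "" then "neutral"
     else if PySem.Str.isIn "joy" raw || PySem.Str.isIn "happiness" raw || PySem.Str.isIn "love" raw || PySem.Str.isIn "optimism" raw || PySem.Str.isIn "trust" raw then "happy"
     else if PySem.Str.isIn "sad" raw || PySem.Str.isIn "grief" raw || PySem.Str.isIn "sorrow" raw then "sad"
     else if PySem.Str.isIn "anger" raw || PySem.Str.isIn "angry" raw || PySem.Str.isIn "rage" raw || PySem.Str.isIn "annoy" raw then "angry"
     else if PySem.Str.isIn "fear" raw || PySem.Str.isIn "anx" raw || PySem.Str.isIn "stress" raw || PySem.Str.isIn "worry" raw || PySem.Str.isIn "nervous" raw then "stressed"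
     else if PySem.Str.isIn "surprise" raw || PySem.Str.isIn "excit" raw || PySem.Str.isIn "anticipation" raw then "excited"
     else if PySem.Str.isIn "calm" raw || PySem.Str.isIn "peace" raw || PySem.Str.isIn "relax" raw then "calm"
     else if PySem.Str.isIn "neutral" raw then "neutral"
     else "neutral")
    = pvRulesDesc.foldl
        (fun result p => if PySem.Str.isIn p.1 raw then p.2 else result) "neutral" := by
  by_cases he : raw = ""
  · subst he; decide
  · rw [pvRulesDesc_groups]
    simp only [List.foldl_append, pvFoldGroup, List.any_cons, List.any_nil,
      Bool.or_false, beq_iff_eq, if_neg he]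
    by_cases h7 : PySem.Str.isIn "neutral" raw = true <;>
      simp [Bool.or_assoc]

-- ===== VERDICT (by name: the statement is the Claim_ definition above) =====
theorem normalize_emotion_py_spec : Claim_equal_normalize_emotion_py := by
  intro label _
  unfold Spec_normalize_emotion_py normalize_emotion_py normalize_emotion_py_alt
  exact pvMain _
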